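-- pv_equiv track=rewrite | github.com/abligail/KeywordGacha | module/Engine/NERAnalyzer/NERAnalyzer.py | build_gender_vote_summary
-- ===== SOURCE A (Python) =====
-- def build_gender_vote_summary(results: list[dict[str, str]], labels: dict[str, str]) -> str:
--     if results == []:
--         return ""
--     counts = {
--         "male": {"high": 0, "low": 0},
--         "female": {"high": 0, "low": 0},
--         "unknown": {"high": 0, "low": 0},
--         "invalid": 0,
--     }
--     details: list[str] = []
--     for idx, result in enumerate(results, start = 1):
--         gender = result.get("gender", "")
--         confidence = result.get("confidence", "")
--         evidence = result.get("evidence", "")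
--         if gender == labels.get("male"):
--             counts["male"]["high" if confidence == "high" else "low"] += 1
--             gender_label = "male"
--         elif gender == labels.get("female"):
--             counts["female"]["high" if confidence == "high" else "low"] += 1
--             gender_label = "female"
--         elif gender == labels.get("unknown"):
--             counts["unknown"]["high" if confidence == "high" else "low"] += 1
--             gender_label = "unknown"
--         else:
--             counts["invalid"] += 1
--             gender_label = "invalid"
--         detail = f"W{idx}:{gender_label}/{confidence} {evidence}".strip()
--         details.append(detail)
--
--     summary = (
--         "vote_summary: "
--         f"male=H{counts['male']['high']}/L{counts['male']['low']}, "
--         f"female=H{counts['female']['high']}/L{counts['female']['low']}, "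
--         f"unknown=H{counts['unknown']['high']}/L{counts['unknown']['low']}, "
--         f"invalid={counts['invalid']}"
--     )
--     if details == []:
--         return summary
--     return summary + "\n" + "\n".join(details)
-- ===== SOURCE B (Python) =====
-- def build_gender_vote_summary(results: list[dict[str, str]], labels: dict[str, str]) -> str:
--     if results == []:
--         return ""
--     # reverse lookup: label text -> gender key; insertion order makes male > female > unknown win on duplicate labels
--     label_map = {}
--     for key in ("unknown", "female", "male"):
--         if key in labels:
--             label_map[labels[key]] = key
--     rows = []
--     for idx, result in enumerate(results, start=1):
--         gender_label = label_map.get(result.get("gender", ""), "invalid")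
--         confidence = result.get("confidence", "")
--         level = "high" if confidence == "high" else "low"
--         detail = f"W{idx}:{gender_label}/{confidence} {result.get('evidence', '')}".strip()
--         rows.append((gender_label, level, detail))
--     def tally(g, lvl):
--         return sum(1 for r in rows if r[0] == g and r[1] == lvl)
--     summary = (
--         "vote_summary: "
--         f"male=H{tally('male', 'high')}/L{tally('male', 'low')}, "
--         f"female=H{tally('female', 'high')}/L{tally('female', 'low')}, "
--         f"unknown=H{tally('unknown', 'high')}/L{tally('unknown', 'low')}, "
--         f"invalid={sum(1 for r in rows if r[0] == 'invalid')}"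
--     )
--     return summary + "\n" + "\n".join(r[2] for r in rows)
-- ===== Notes on version B (the rewrite author's own statement) =====
-- stated objective: alternative
-- what changed: Replaces A's per-element if/elif label chain and incrementally mutated nested counts dict by a reverse label-to-gender lookup dict (built in unknown/female/male order so later inserts preserve A's priority on duplicate labels) plus a single precomputed row list from which the six high/low tallies and the invalid count are counted afterwards.
import Mathlib
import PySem

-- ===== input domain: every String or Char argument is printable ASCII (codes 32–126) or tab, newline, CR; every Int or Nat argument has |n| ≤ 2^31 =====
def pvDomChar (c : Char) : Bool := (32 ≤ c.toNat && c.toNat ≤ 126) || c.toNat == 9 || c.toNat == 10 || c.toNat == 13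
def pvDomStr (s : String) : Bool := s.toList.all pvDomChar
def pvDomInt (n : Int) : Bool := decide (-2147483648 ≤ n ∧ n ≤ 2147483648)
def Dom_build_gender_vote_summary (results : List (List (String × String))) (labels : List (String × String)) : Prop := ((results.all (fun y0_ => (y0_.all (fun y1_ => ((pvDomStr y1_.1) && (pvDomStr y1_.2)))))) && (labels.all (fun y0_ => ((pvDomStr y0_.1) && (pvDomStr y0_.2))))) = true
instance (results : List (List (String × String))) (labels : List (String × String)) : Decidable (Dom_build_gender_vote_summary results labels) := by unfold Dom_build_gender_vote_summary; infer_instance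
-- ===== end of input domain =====

-- B replaces A's if/elif classification chain and nested mutable counter dict by a reverse
-- label→gender lookup dict plus tallies counted from a single precomputed row list (objective: idiomatic).

-- ===== PORT A =====
-- Python's heterogeneous counts dict ({"male": {"high":…,"low":…}, …, "invalid": int}) cannot be
-- typed as one PySem.Dict; it is ported step for step as a 7-tuple (mh, ml, fh, fl, uh, ul, inv),
-- each component updated exactly where the Python increments the corresponding entry.
def goA (labels : List (String × String)) :
    List (List (String × String)) → Int →
    (Int × Int × Int × Int × Int × Int × Int) → List String →
    (Int × Int × Int × Int × Int × Int × Int) × List String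
  | [], _, c, details => (c, details)
  | result :: rest, idx, (mh, ml, fh, fl, uh, ul, inv), details =>
    let gender := (PySem.Dict.mk result).getD "gender" ""
    let confidence := (PySem.Dict.mk result).getD "confidence" ""
    let evidence := (PySem.Dict.mk result).getD "evidence" ""
    let step :=
      if (PySem.Dict.mk labels).get? "male" == some gender then
        ((((if confidence == "high" then (mh + 1, ml) else (mh, ml + 1)).1,
           (if confidence == "high" then (mh + 1, ml) else (mh, ml + 1)).2,
           fh, fl, uh, ul, inv) : Int × Int × Int × Int × Int × Int × Int), "male")
      else if (PySem.Dict.mk labels).get? "female" == some gender then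
        ((mh, ml,
          (if confidence == "high" then (fh + 1, fl) else (fh, fl + 1)).1,
          (if confidence == "high" then (fh + 1, fl) else (fh, fl + 1)).2,
          uh, ul, inv), "female")
      else if (PySem.Dict.mk labels).get? "unknown" == some gender then
        ((mh, ml, fh, fl,
          (if confidence == "high" then (uh + 1, ul) else (uh, ul + 1)).1,
          (if confidence == "high" then (uh + 1, ul) else (uh, ul + 1)).2,
          inv), "unknown")
      else ((mh, ml, fh, fl, uh, ul, inv + 1), "invalid")
    let gender_label := step.2
    let detail := PySem.Str.strip ("W" ++ PySem.Int.toStr idx ++ ":" ++ gender_label ++ "/" ++ confidence ++ " " ++ evidence)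
    goA labels rest (idx + 1) step.1 (details ++ [detail])

def build_gender_vote_summary (results : List (List (String × String))) (labels : List (String × String)) : String :=
  if results = [] then ""
  else
    let r := goA labels results 1 (0, 0, 0, 0, 0, 0, 0) []
    let (mh, ml, fh, fl, uh, ul, inv) := r.1
    let details := r.2
    let summary :=
      "vote_summary: male=H" ++ PySem.Int.toStr mh ++ "/L" ++ PySem.Int.toStr ml ++
      ", female=H" ++ PySem.Int.toStr fh ++ "/L" ++ PySem.Int.toStr fl ++
      ", unknown=H" ++ PySem.Int.toStr uh ++ "/L" ++ PySem.Int.toStr ul ++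
      ", invalid=" ++ PySem.Int.toStr inv
    if details = [] then summary
    else summary ++ "\n" ++ PySem.Str.join "\n" details

-- ===== PORT B =====
def labelMapB (labels : List (String × String)) : PySem.Dict String String :=
  ["unknown", "female", "male"].foldl
    (fun m key =>
      match (PySem.Dict.mk labels).get? key with
      | some v => m.insert v key
      | none => m)
    PySem.Dict.empty

def goB (lm : PySem.Dict String String) :
    List (List (String × String)) → Int → List (String × String × String) →
    List (String × String × String)
  | [], _, rows => rows
  | result :: rest, idx, rows =>
    let gender_label := lm.getD ((PySem.Dict.mk result).getD "gender" "") "invalid"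
    let confidence := (PySem.Dict.mk result).getD "confidence" ""
    let level := if confidence == "high" then "high" else "low"
    let detail := PySem.Str.strip ("W" ++ PySem.Int.toStr idx ++ ":" ++ gender_label ++ "/" ++ confidence ++ " " ++ (PySem.Dict.mk result).getD "evidence" "")
    goB lm rest (idx + 1) (rows ++ [(gender_label, level, detail)])

def tallyB (rows : List (String × String × String)) (g lvl : String) : Int :=
  rows.foldl (fun a r => if r.1 == g && r.2.1 == lvl then a + 1 else a) 0

def invalidB (rows : List (String × String × String)) : Int :=
  rows.foldl (fun a r => if r.1 == "invalid" then a + 1 else a) 0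

def build_gender_vote_summary_alt (results : List (List (String × String))) (labels : List (String × String)) : String :=
  if results = [] then ""
  else
    let lm := labelMapB labels
    let rows := goB lm results 1 []
    let summary :=
      "vote_summary: male=H" ++ PySem.Int.toStr (tallyB rows "male" "high") ++ "/L" ++ PySem.Int.toStr (tallyB rows "male" "low") ++
      ", female=H" ++ PySem.Int.toStr (tallyB rows "female" "high") ++ "/L" ++ PySem.Int.toStr (tallyB rows "female" "low") ++
      ", unknown=H" ++ PySem.Int.toStr (tallyB rows "unknown" "high") ++ "/L" ++ PySem.Int.toStr (tallyB rows "unknown" "low") ++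
      ", invalid=" ++ PySem.Int.toStr (invalidB rows)
    summary ++ "\n" ++ PySem.Str.join "\n" (rows.map (·.2.2))

-- ===== PRECONDITION & SPEC =====
def Spec_build_gender_vote_summary (results : List (List (String × String))) (labels : List (String × String)) (out : String) : Prop := out = build_gender_vote_summary_alt results labels
instance (results : List (List (String × String))) (labels : List (String × String)) (out : String) : Decidable (Spec_build_gender_vote_summary results labels out) := by unfold Spec_build_gender_vote_summary; infer_instance

-- ===== CLAIM (what is proved, stated in full; the proofs are below) =====
def Claim_equal_build_gender_vote_summary : Prop := ∀ (results : List (List (String × String))) (labels : List (String × String)), Dom_build_gender_vote_summary results labels → Spec_build_gender_vote_summary results labels (build_gender_vote_summary results labels)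

-- ===== LEMMAS AND PROOFS =====

-- A's if/elif chain as a classification function of the raw gender string.
def classifyA (labels : List (String × String)) (gender : String) : String :=
  if (PySem.Dict.mk labels).get? "male" == some gender then "male"
  else if (PySem.Dict.mk labels).get? "female" == some gender then "female"
  else if (PySem.Dict.mk labels).get? "unknown" == some gender then "unknown"
  else "invalid"

set_option maxRecDepth 4000 in
lemma labelMapB_getD (labels : List (String × String)) (gender : String) :
    (labelMapB labels).getD gender "invalid" = classifyA labels gender := by
  unfold labelMapB classifyA
  simp only [List.foldl]
  rcases hu : (PySem.Dict.mk labels).get? "unknown" with _ | vu <;>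
  rcases hf : (PySem.Dict.mk labels).get? "female" with _ | vf <;>
  rcases hm : (PySem.Dict.mk labels).get? "male" with _ | vm <;>
  simp only [PySem.Dict.getD_insert, PySem.Dict.getD_empty, beq_iff_eq] <;>
  split_ifs <;> simp_all

-- closed form of B's row list
def rowsSpec (lm : PySem.Dict String String) : Int → List (List (String × String)) → List (String × String × String)
  | _, [] => []
  | idx, result :: rest =>
    (lm.getD ((PySem.Dict.mk result).getD "gender" "") "invalid",
     (if (PySem.Dict.mk result).getD "confidence" "" == "high" then "high" else "low"),
     PySem.Str.strip ("W" ++ PySem.Int.toStr idx ++ ":" ++ lm.getD ((PySem.Dict.mk result).getD "gender" "") "invalid" ++ "/" ++ (PySem.Dict.mk result).getD "confidence" "" ++ " " ++ (PySem.Dict.mk result).getD "evidence" "")) ::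
    rowsSpec lm (idx + 1) rest

lemma goB_eq (lm : PySem.Dict String String) (rs : List (List (String × String))) :
    ∀ (idx : Int) (rows : List (String × String × String)),
      goB lm rs idx rows = rows ++ rowsSpec lm idx rs := by
  induction rs with
  | nil => intro idx rows; simp [goB, rowsSpec]
  | cons r rest ih => intro idx rows; simp [goB, rowsSpec, ih, List.append_assoc]

lemma tallyB_shift (rows : List (String × String × String)) (g lvl : String) :
    ∀ a : Int, rows.foldl (fun a r => if r.1 == g && r.2.1 == lvl then a + 1 else a) a
      = a + tallyB rows g lvl := by
  unfold tallyB
  induction rows with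
  | nil => intro a; simp
  | cons r rest ih =>
    intro a; simp only [List.foldl]
    rw [ih, ih (if r.1 == g && r.2.1 == lvl then 0 + 1 else 0)]
    split_ifs <;> ring

lemma invalidB_shift (rows : List (String × String × String)) :
    ∀ a : Int, rows.foldl (fun a r => if r.1 == "invalid" then a + 1 else a) a
      = a + invalidB rows := by
  unfold invalidB
  induction rows with
  | nil => intro a; simp
  | cons r rest ih =>
    intro a; simp only [List.foldl]
    rw [ih, ih (if r.1 == "invalid" then 0 + 1 else 0)]
    split_ifs <;> ring

lemma tallyB_cons (r : String × String × String) (rows : List (String × String × String)) (g lvl : String) :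
    tallyB (r :: rows) g lvl = (if r.1 == g && r.2.1 == lvl then 1 else 0) + tallyB rows g lvl := by
  unfold tallyB
  simp only [List.foldl]
  rw [tallyB_shift]
  split_ifs <;> simp [tallyB]

lemma invalidB_cons (r : String × String × String) (rows : List (String × String × String)) :
    invalidB (r :: rows) = (if r.1 == "invalid" then 1 else 0) + invalidB rows := by
  unfold invalidB
  simp only [List.foldl]
  rw [invalidB_shift]
  split_ifs <;> simp [invalidB]

-- main invariant: A's loop state equals accumulators plus B-side tallies over the remaining rows
lemma goA_eq (labels : List (String × String)) (rs : List (List (String × String))) :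
    ∀ (idx mh ml fh fl uh ul inv : Int) (details : List String),
      goA labels rs idx (mh, ml, fh, fl, uh, ul, inv) details =
        ((mh + tallyB (rowsSpec (labelMapB labels) idx rs) "male" "high",
          ml + tallyB (rowsSpec (labelMapB labels) idx rs) "male" "low",
          fh + tallyB (rowsSpec (labelMapB labels) idx rs) "female" "high",
          fl + tallyB (rowsSpec (labelMapB labels) idx rs) "female" "low",
          uh + tallyB (rowsSpec (labelMapB labels) idx rs) "unknown" "high",
          ul + tallyB (rowsSpec (labelMapB labels) idx rs) "unknown" "low",
          inv + invalidB (rowsSpec (labelMapB labels) idx rs)),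
         details ++ (rowsSpec (labelMapB labels) idx rs).map (·.2.2)) := by
  induction rs with
  | nil => intro idx mh ml fh fl uh ul inv details; simp [goA, rowsSpec, tallyB, invalidB]
  | cons result rest ih =>
    intro idx mh ml fh fl uh ul inv details
    have hcls := labelMapB_getD labels ((PySem.Dict.mk result).getD "gender" "")
    simp only [goA, rowsSpec]
    rw [ih]
    rw [tallyB_cons, tallyB_cons, tallyB_cons, tallyB_cons, tallyB_cons, tallyB_cons, invalidB_cons]
    unfold classifyA at hcls
    by_cases h1 : (PySem.Dict.mk labels).get? "male" == some ((PySem.Dict.mk result).getD "gender" "") <;>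
    by_cases h2 : (PySem.Dict.mk labels).get? "female" == some ((PySem.Dict.mk result).getD "gender" "") <;>
    by_cases h3 : (PySem.Dict.mk labels).get? "unknown" == some ((PySem.Dict.mk result).getD "gender" "") <;>
    by_cases hc : (PySem.Dict.mk result).getD "confidence" "" == "high" <;>
    simp only [h1, h2, h3, hc] at hcls ⊢ <;>
    simp [hcls, List.append_assoc] <;> ring_nf

-- ===== VERDICT (by name: the statement is the Claim_ definition above) =====
theorem build_gender_vote_summary_spec : Claim_equal_build_gender_vote_summary := by
  intro results labels _
  unfold Spec_build_gender_vote_summary build_gender_vote_summary build_gender_vote_summary_alt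
  cases results with
  | nil => rw [if_pos rfl, if_pos rfl]
  | cons r rest =>
    rw [if_neg (List.cons_ne_nil r rest), if_neg (List.cons_ne_nil r rest)]
    simp only [goA_eq, goB_eq, List.nil_append, zero_add]
    simp [rowsSpec]
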